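-- pv_equiv track=rewrite | github.com/lupomancer/Python | Term1/file_analysis/letter_word_count_while.py | word_letter_count
-- ===== SOURCE A (Python) =====
-- def remove_punctuation(passage):
--     """
--     This function returns a string with all punctuation converted to spaces
--
--     Args:
--         passage: the source string
--
--     Returns:
--         string with no punctuation only spaces
--
--     Note:
--         There are better ways to do this (e.g. use regular expressions)
--     """
--     punctuation = ".", "'", '"', ";", ":", ",", "?"
--     punctuation_index = 0
--     while punctuation_index < len(punctuation):
--         passage = passage.replace(punctuation[punctuation_index], " ")
--         punctuation_index += 1
--
--     return passage
--
-- def word_letter_count(phrase):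
--     """Calculates word and letter frequencies for phrase
--
--     Arguments:
--         phrase (str):  phrase on which count word and letter frequencies will
--                        be calculated
--
--     Returns:
--         tuple: tuple containing two dictionaries - word count, and letter count
--                indexed by words/ letters and storing the count for each
--     """
--
--     word_freq = {}
--     letter_freq = {}
--
--     words = remove_punctuation(phrase).lower().split()
--     word_index = 0
--
--     while word_index < len(words):
--
--         if words[word_index] in word_freq:
--             word_freq[words[word_index]] += 1
--         else:
--             word_freq[words[word_index]] = 1
--
--         word = words[word_index]
--         letter_index = 0
--
--         while letter_index < len(word):
--             if word[letter_index] in letter_freq: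
--                 letter_freq[word[letter_index]] += 1
--             else:
--                 letter_freq[word[letter_index]] = 1
--
--             letter_index += 1
--
--         word_index += 1
--
--     return word_freq, letter_freq
-- ===== SOURCE B (Python) =====
-- def remove_punctuation(passage):
--     punctuation = ".", "'", '"', ";", ":", ",", "?"
--     punctuation_index = 0
--     while punctuation_index < len(punctuation):
--         passage = passage.replace(punctuation[punctuation_index], " ")
--         punctuation_index += 1
--     return passage
--
-- def word_letter_count(phrase):
--     """Word and letter frequencies by dedup-then-count instead of incremental counters."""
--     words = remove_punctuation(phrase).lower().split()
--     letters = [c for w in words for c in w]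
--     word_freq = {w: words.count(w) for w in dict.fromkeys(words)}
--     letter_freq = {c: letters.count(c) for c in dict.fromkeys(letters)}
--     return word_freq, letter_freq
-- ===== Notes on version B (the rewrite author's own statement) =====
-- stated objective: simpler
-- what changed: Replaces A's index-driven while loops that grow two dicts with per-occurrence increments by a dedup-then-count decomposition: flatten the letters once, then build each dict as a comprehension {k: seq.count(k) for k in dict.fromkeys(seq)}.
import Mathlib
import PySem

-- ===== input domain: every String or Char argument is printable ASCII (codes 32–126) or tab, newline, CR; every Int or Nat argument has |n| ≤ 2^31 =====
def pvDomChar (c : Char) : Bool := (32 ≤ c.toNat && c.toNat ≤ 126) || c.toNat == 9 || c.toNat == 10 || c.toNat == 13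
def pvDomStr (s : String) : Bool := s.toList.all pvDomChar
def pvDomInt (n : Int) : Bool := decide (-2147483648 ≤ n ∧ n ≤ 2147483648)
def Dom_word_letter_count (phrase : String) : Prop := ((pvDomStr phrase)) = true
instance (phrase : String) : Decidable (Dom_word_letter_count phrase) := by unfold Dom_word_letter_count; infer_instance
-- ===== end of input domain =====

-- B replaces A's per-occurrence increment loops by a dedup-then-count decomposition (simpler, not faster).
-- Both ports share the remove_punctuation helper (identical preprocessing in both Pythons).

-- ===== PORT A =====
def remove_punctuation (passage : String) : String :=
  let punctuation : List String := [".", "'", "\"", ";", ":", ",", "?"]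
  -- while over punctuation_index becomes a fold over the tuple's elements
  punctuation.foldl (fun p q => PySem.Str.replace p q " ") passage

def word_letter_count (phrase : String) : (List (String × Int)) × (List (String × Int)) :=
  let words := PySem.Str.split₀ (PySem.Str.lower (remove_punctuation phrase))
  -- outer while over word_index, carrying both dicts; inner while over letter_index
  let st := words.foldl
    (fun (st : PySem.Dict String Int × PySem.Dict String Int) w =>
      let wf := if st.1.contains w then st.1.insert w (st.1.getD w 0 + 1) else st.1.insert w 1
      let lf := w.toList.foldl
        (fun lf c =>
          if lf.contains (String.ofList [c]) then lf.insert (String.ofList [c]) (lf.getD (String.ofList [c]) 0 + 1)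
          else lf.insert (String.ofList [c]) 1) st.2
      (wf, lf))
    (PySem.Dict.empty, PySem.Dict.empty)
  (st.1.items, st.2.items)

-- ===== PORT B =====
def word_letter_count_alt (phrase : String) : (List (String × Int)) × (List (String × Int)) :=
  let words := PySem.Str.split₀ (PySem.Str.lower (remove_punctuation phrase))
  let letters := words.flatMap (fun w => w.toList.map (fun c => String.ofList [c]))
  let word_freq := (PySem.List.dedup words).map (fun w => (w, (PySem.List.count words w : Int)))
  let letter_freq := (PySem.List.dedup letters).map (fun c => (c, (PySem.List.count letters c : Int)))
  (word_freq, letter_freq)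

-- ===== PRECONDITION & SPEC =====
def Spec_word_letter_count (phrase : String) (out : (List (String × Int)) × (List (String × Int))) : Prop := out = word_letter_count_alt phrase
instance (phrase : String) (out : (List (String × Int)) × (List (String × Int))) : Decidable (Spec_word_letter_count phrase out) := by unfold Spec_word_letter_count; infer_instance

-- ===== CLAIM (what is proved, stated in full; the proofs are below) =====
def Claim_equal_word_letter_count : Prop := ∀ (phrase : String), Dom_word_letter_count phrase → Spec_word_letter_count phrase (word_letter_count phrase)

-- ===== LEMMAS AND PROOFS =====

-- A's "if k in d: d[k] += 1 else: d[k] = 1" step is the counter step.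
lemma wlc_step_eq_counter_step (d : PySem.Dict String Int) (k : String) :
    (if d.contains k then d.insert k (d.getD k 0 + 1) else d.insert k 1)
      = d.insert k (d.getD k 0 + 1) := by
  by_cases h : d.contains k = true
  · simp [h]
  · simp only [Bool.not_eq_true] at h
    simp [h, PySem.Dict.getD_of_not_contains d 0 h]

-- A's counting loop over a key list, from the empty dict, returns exactly B's dedup-and-count items.
lemma wlc_fold_items (ks : List String) :
    (ks.foldl
      (fun (d : PySem.Dict String Int) k =>
        if d.contains k then d.insert k (d.getD k 0 + 1) else d.insert k 1)
      PySem.Dict.empty).items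
      = (PySem.List.dedup ks).map (fun k => (k, (PySem.List.count ks k : Int))) := by
  rw [PySem.List.foldl_congr_mem ks _ (fun d k => d.insert k (d.getD k 0 + 1))
      PySem.Dict.empty (fun acc x _ => wlc_step_eq_counter_step acc x)]
  rw [PySem.Dict.foldl_insert_getD_add_one_eq_counter, PySem.Dict.items_counter]
  rfl

-- The whole computation on an arbitrary word list: A's paired fold = B's dedup-and-count.
lemma wlc_main (ws : List String) :
    (let st := ws.foldl
      (fun (st : PySem.Dict String Int × PySem.Dict String Int) w =>
        let wf := if st.1.contains w then st.1.insert w (st.1.getD w 0 + 1) else st.1.insert w 1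
        let lf := w.toList.foldl
          (fun lf c =>
            if lf.contains (String.ofList [c]) then lf.insert (String.ofList [c]) (lf.getD (String.ofList [c]) 0 + 1)
            else lf.insert (String.ofList [c]) 1) st.2
        (wf, lf))
      (PySem.Dict.empty, PySem.Dict.empty)
     (st.1.items, st.2.items))
    = (let letters := ws.flatMap (fun w => w.toList.map (fun c => String.ofList [c]))
       ((PySem.List.dedup ws).map (fun w => (w, (PySem.List.count ws w : Int))),
        (PySem.List.dedup letters).map (fun c => (c, (PySem.List.count letters c : Int))))) := by
  simp only
  rw [PySem.List.foldl_prod_mk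
      (f := fun (d : PySem.Dict String Int) w =>
        if d.contains w then d.insert w (d.getD w 0 + 1) else d.insert w 1)
      (g := fun (d : PySem.Dict String Int) (w : String) =>
        w.toList.foldl
          (fun lf c =>
            if lf.contains (String.ofList [c]) then lf.insert (String.ofList [c]) (lf.getD (String.ofList [c]) 0 + 1)
            else lf.insert (String.ofList [c]) 1) d)]
  have hinner : (fun (d : PySem.Dict String Int) (w : String) =>
        w.toList.foldl
          (fun lf c =>
            if lf.contains (String.ofList [c]) then lf.insert (String.ofList [c]) (lf.getD (String.ofList [c]) 0 + 1)
            else lf.insert (String.ofList [c]) 1) d)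
      = (fun d w => (w.toList.map (fun c => String.ofList [c])).foldl
          (fun lf k => if lf.contains k then lf.insert k (lf.getD k 0 + 1) else lf.insert k 1) d) := by
    funext d w; rw [List.foldl_map]
  rw [hinner, ← List.foldl_flatMap]
  exact Prod.ext (wlc_fold_items ws) (wlc_fold_items _)

theorem word_letter_count_spec : Claim_equal_word_letter_count := by
  intro phrase _
  show word_letter_count phrase = word_letter_count_alt phrase
  exact wlc_main (PySem.Str.split₀ (PySem.Str.lower (remove_punctuation phrase)))
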